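/- GENERATED by mk_final_copies.py from the proof of the farm's unit `decode_residue.6bb` (farm:decode_residue.6bb.1: Lemmas.lean) as the
   re-elaboration sweep compiled it — do not edit. -/
import Asan.CheckWalk
import Vorbis.Spec.Units.decode_residue_6bb

/-
  LEMMAS of the proof unit `decode_residue.6bb` (the call arm of the i-loop 2229). First part: the head start of `decode_residue.6b` (the body proper of the i-loop 2229, 0x10f579 … with the call at 0x10f538): the
  lemmas of the worker of decode_residue.6 (attempt 1) that the body needs (without the `idiv` lemmas: the call arm has none). `deintPre_of` is the WHOLE precondition of the call;
  `Common.same` after the call: the tree's `Entered.same_through_deint` (Vorbis/Spec/DecodeResidueCarry.lean).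
-/
namespace Vorbis.Spec.decode_residue_6bb
open X86 X86.User Asan Vorbis Vorbis.Spec Vorbis.Spec.DecodeResidue

/-- The windows of the own stack frame that path A stores to between two cut points: `[RA−848, RA−248)` (below the steady
stack pointer), `class_set = [rbp−0xd8, +4)`, `[rbp−0xb8, +4)`, `[rbp−0x98, +4)`, `c_inter = [rbp−0x60, +4)`, `p_inter = [rbp−0x50, +4)`. -/
def ownWins (g : G) : List Span :=
  [⟨g.RA - 848, g.RA - 248⟩, ⟨g.RA - 224, g.RA - 220⟩, ⟨g.RA - 192, g.RA - 188⟩, ⟨g.RA - 160, g.RA - 156⟩,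
   ⟨g.RA - 104, g.RA - 100⟩, ⟨g.RA - 88, g.RA - 84⟩]

/-- Every window of `ownWins` lies inside the stack window `[RA − 848, RA)` of the contract's footprint. -/
theorem ownWins_stack (g : G) (hroom : 0x700000 + 848 ≤ g.RA) :
    ∀ w, w ∈ ownWins g → g.RA - 848 ≤ w.lo ∧ w.hi ≤ g.RA ∧ w.lo ≤ w.hi := by
  intro w hw
  simp only [ownWins, List.mem_cons, List.mem_nil_iff, or_false] at hw
  rcases hw with rfl | rfl | rfl | rfl | rfl | rfl <;> simp only [] <;> omega

/-- The value of a stack address `RA − k` as a number. -/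
theorem toNat_slot6 (g : G) (hroom : 0x700000 + 848 ≤ g.RA) (k : Nat) (hk : k ≤ 848) :
    (g.e.reg .rsp - UInt64.ofNat k).toNat = g.RA - k := by
  have e : (g.e.reg .rsp).toNat = g.RA := rfl
  have hlt := (g.e.reg .rsp).toNat_lt
  have hk' : (UInt64.ofNat k).toNat = k := by
    rw [UInt64.toNat_ofNat']
    exact Nat.mod_eq_of_lt (by omega)
  have hle : UInt64.ofNat k ≤ g.e.reg .rsp := by
    rw [UInt64.le_iff_toNat_le, hk', e]
    omega
  rw [UInt64.toNat_sub_of_le _ _ hle, hk', e]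

/-- **A slot of the frame outside `ownWins` reads the same**: `[RA − k, RA − k + n)` with `n ≤ k ≤ 848`, disjoint from the six
windows (for a literal `k`, `n` the last hypothesis is `by omega`). -/
theorem stack_read {g : G} {m m' : Mem} (hroom : 0x700000 + 848 ≤ g.RA ∧ g.RA + 8 ≤ 0x800000)
    (hs : Mem.SameExcept (ownWins g) m m') (k n : Nat) (hn : n ≤ k) (hk : k ≤ 848)
    (hoff : (848 ≤ k - n ∨ k ≤ 248) ∧ (224 ≤ k - n ∨ k ≤ 220) ∧ (192 ≤ k - n ∨ k ≤ 188) ∧ (160 ≤ k - n ∨ k ≤ 156) ∧ (104 ≤ k - n ∨ k ≤ 100) ∧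
      (88 ≤ k - n ∨ k ≤ 84)) :
    m'.readLE (g.e.reg .rsp - UInt64.ofNat k) n = m.readLE (g.e.reg .rsp - UInt64.ofNat k) n := by
  have e := toNat_slot6 g hroom.1 k hk
  apply hs.readLE
  · rw [e]
    omega
  · intro w hw
    rw [e]
    simp only [ownWins, List.mem_cons, List.mem_nil_iff, or_false] at hw
    rcases hw with rfl | rfl | rfl | rfl | rfl | rfl <;> simp only [] <;> omega

/-- A span that does not meet the stack region misses every window of `ownWins`. -/
theorem ownWins_off (g : G) (hroom : 0x700000 + 848 ≤ g.RA ∧ g.RA + 8 ≤ 0x800000) {lo hi : Nat}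
    (h : hi ≤ 0x700000 ∨ 0x800000 ≤ lo) : ∀ w, w ∈ ownWins g → hi ≤ w.lo ∨ w.hi ≤ lo := by
  intro w hw
  have := ownWins_stack g hroom.1 w hw
  omega

/-- **COMMON is kept by stores into the own frame's scratch windows** (`ownWins`): the frame facts FR read slots outside the
windows; the footprint grows inside its stack window; the shadow, `*f`, the temp block, the configuration lie off the stack.
The registers and the two state facts are the walker's. -/
theorem common_of_stack {u₀ : State} {g : G} (he : Entered u₀ g) {v v' : State} (c : Common u₀ g v)
    (hs : Mem.SameExcept (ownWins g) v.mem v'.mem)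
    (rbp : v'.reg .rbp = g.e.reg .rsp - 8) (rsp : v'.reg .rsp = g.e.reg .rsp - 248)
    (code : CodeOK u₀ v'.mem) (inv : abiInv v') : Common u₀ g v' := by
  have hroom := he.room
  have hob : g.Blk (objBlock g.f) := he.vorbis.obj
  have hobst := he.pre.free.offStack _ hob
  have hobin := he.pre.env.ok.inside _ hob
  simp only [vblock, voff] at hobst hobin
  -- a slot outside the windows
  have rd : ∀ (k n : Nat), n ≤ k → k ≤ 848 →
      ((848 ≤ k - n ∨ k ≤ 248) ∧ (224 ≤ k - n ∨ k ≤ 220) ∧ (192 ≤ k - n ∨ k ≤ 188) ∧ (160 ≤ k - n ∨ k ≤ 156) ∧ (104 ≤ k - n ∨ k ≤ 100) ∧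
        (88 ≤ k - n ∨ k ≤ 84)) →
      v'.mem.readLE (g.e.reg .rsp - UInt64.ofNat k) n = v.mem.readLE (g.e.reg .rsp - UInt64.ofNat k) n :=
    fun k n hn hk hoff => stack_read hroom hs k n hn hk hoff
  -- a span of `*f` is off the windows
  have offObj : ∀ lo hi : Nat, g.f ≤ lo → hi ≤ g.f + 1808 → ∀ w, w ∈ ownWins g → hi ≤ w.lo ∨ w.hi ≤ lo := by
    intro lo hi h1 h2
    exact ownWins_off g hroom (by omega)
  apply Common.of_frame he rbp rsp code inv
  · exact (congrArg UInt64.ofNat (rd 8 8 (by omega) (by omega) (by omega))).trans c.s_rbp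
  · exact (congrArg UInt64.ofNat (rd 16 8 (by omega) (by omega) (by omega))).trans c.s_r15
  · exact (congrArg UInt64.ofNat (rd 24 8 (by omega) (by omega) (by omega))).trans c.s_r14
  · exact (congrArg UInt64.ofNat (rd 32 8 (by omega) (by omega) (by omega))).trans c.s_r13
  · exact (congrArg UInt64.ofNat (rd 40 8 (by omega) (by omega) (by omega))).trans c.s_r12
  · exact (congrArg UInt64.ofNat (rd 48 8 (by omega) (by omega) (by omega))).trans c.s_rbx
  · exact (congrArg UInt64.ofNat (rd 184 8 (by omega) (by omega) (by omega))).trans c.fr_f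
  · exact (congrArg UInt64.ofNat (rd 216 8 (by omega) (by omega) (by omega))).trans c.fr_rb
  · exact (rd 156 4 (by omega) (by omega) (by omega)).trans c.fr_ch
  · exact (rd 196 4 (by omega) (by omega) (by omega)).trans c.fr_prd
  · exact (rd 200 4 (by omega) (by omega) (by omega)).trans c.fr_w
  · exact (rd 232 4 (by omega) (by omega) (by omega)).trans c.fr_rtype
  · exact (rd 176 8 (by omega) (by omega) (by omega)).trans c.fr_pcd
  · exact (rd 240 8 (by omega) (by omega) (by omega)).trans c.fr_si
  · -- the footprint: the windows lie inside its stack window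
    apply c.same.trans
    apply hs.mono
    intro w hw a h1 h2
    have hw' := ownWins_stack g hroom.1 w hw
    refine ⟨⟨(g.e.reg .rsp).toNat - 848, (g.e.reg .rsp).toNat⟩, ?_, ?_, ?_⟩
    · unfold Spec.footprint
      exact List.mem_cons_self ..
    · show (g.e.reg .rsp).toNat - 848 ≤ a
      have e : (g.e.reg .rsp).toNat = g.RA := rfl
      omega
    · show a < (g.e.reg .rsp).toNat
      have e : (g.e.reg .rsp).toNat = g.RA := rfl
      omega
  · -- the shadow layer: no shadow byte is on the stack
    apply c.shadow.untouched
    exact hs.eqOn _ _ (ownWins_off g hroom (by omega))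
  · -- Bits: the four windows of `*f` it reads
    apply c.point.vorbis.bits.frame_fields
    apply Bits.SameFields.of_sameExcept hs
    · exact offObj _ _ (by omega) (by omega)
    · exact offObj _ _ (by omega) (by omega)
    · exact offObj _ _ (by omega) (by omega)
    · exact offObj _ _ (by omega) (by omega)
  · -- ADOBusy: the arena fields of `*f`
    have hb : ADOBusy g.A' g.others' v.mem g.f g.sz := c.point.busy
    apply hb.transfer
    apply ObjEq.of_sameExcept hs
    · intro w hw
      have := (by decide : WinsBelow ADO.wins 1808) w hw
      omega
    · intro w hw s hsp
      have hb' := (by decide : WinsBelow ADO.wins 1808) w hw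
      have hw1 : w.1 ≤ w.2 ∨ w.2 ≤ w.1 := by omega
      exact offObj (g.f + w.1) (g.f + w.2) (by omega) (by omega) s hsp
  · -- TB: the temp block lies in the arena, off the stack
    have hb : ADOBusy g.A' g.others' v.mem g.f g.sz := c.point.busy
    have ht := hb.ok.tblock_off c.tblock
    have hsz := c.tb.size
    have h3 : g.C * (8 + 8 * g.PRD) = g.C * 8 + g.C * (8 * g.PRD) := Nat.mul_add _ _ _
    apply c.tb.frame
    apply Block.Kept.of_sameExcept hs
    · intro w hw
      have := ownWins_off g hroom (lo := g.TB.base) (hi := g.TB.base + g.TB.size) (by omega) w hw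
      simp only []
      omega
    · simp only []
      omega
  · -- μ reads `*f` only
    have e : mu v'.mem g.f = mu v.mem g.f := by
      apply mu_frame (by omega)
      · exact hs.eqOn _ _ (offObj _ _ (by omega) (by omega))
      · exact hs.eqOn _ _ (offObj _ _ (by omega) (by omega))
      · exact hs.eqOn _ _ (offObj _ _ (by omega) (by omega))
      · exact hs.eqOn _ _ (offObj _ _ (by omega) (by omega))
    rw [e]
    exact c.mu_le

/-- **A field of the record `r`** (`r + off`, `n` bytes inside the 32-byte record): a check site, in the live set inside the
function (R2 + P1). -/
theorem rec_site {u₀ : State} {g : G} (he : Entered u₀ g) {v : State} (c : Common u₀ g v) (off n : Nat)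
    (hoff : off + n ≤ 32) (hn : 1 ≤ n) : Site g.Live' (g.r + off) n := by
  have hr : ResidueOK g.Blk v.mem g.f := c.point.vorbis.residue
  apply hr.site_record c.point.env.live (c.rn_lt he) off n _ hn
  · rw [c.config_at]
  · simp only [voff]
    omega

/-- **Where the record is**: in the data space, off the stack region (R2, `BlkOK`, `BlkFree.offStack`). -/
theorem rec_where {u₀ : State} {g : G} (he : Entered u₀ g) :
    0x100000 ≤ g.r ∧ g.r + 32 ≤ 0xC00000 ∧ (g.r + 32 ≤ 0x700000 ∨ 0x800000 ≤ g.r) := by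
  have hR : ResidueOK g.Blk g.e.mem g.f := he.vorbis.residue
  have h2 := hR.R2
  have hin := he.pre.env.ok.inside _ h2
  have hst := he.pre.free.offStack _ h2
  have hlt := he.args.rn_lt
  have h1 := hR.R1
  have hlt' : g.rn < (stb_vorbis.residue_count g.e.mem g.f).toNat := by omega
  have er : g.r = stb_vorbis.residue_config g.e.mem g.f + 32 * g.rn := by
    unfold G.r stb_vorbis.residue_config_at
    simp only [voff]
  simp only [voff] at hin hst
  omega

/-- **The bounds of the arguments**: `n ≤ 4096` (P1 + HD3), `ch ≤ C ≤ 16` (P2 + HD1). -/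
theorem arg_bounds {u₀ : State} {g : G} (he : Entered u₀ g) : g.n ≤ 4096 ∧ g.ch ≤ g.C ∧ g.C ≤ 16 := by
  have hh := he.vorbis.header
  obtain ⟨a, b, h6, hab, hb, e0, e1⟩ := hh.HD3
  have h1 := hh.HD1
  have hn := he.args.n_le
  have hc := he.args.ch_le
  have hp : 2 ^ b ≤ 2 ^ 13 := Nat.pow_le_pow_right (by decide) hb
  have eb : bsize g.e.mem g.f 1 = 2 ^ b := by
    unfold bsize
    rw [if_neg (by decide), e1]
    exact Int.toNat_natCast _
  have eC : g.C = (stb_vorbis.channels g.e.mem g.f).toNat := rfl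
  refine ⟨?_, hc, ?_⟩
  · rw [eb] at hn
    omega
  · omega

/-- **Fact K on path A** in the memory of a cut point: for `pc < part_read`, `1 ≤ part_size` (R5) and
`z(pc) + part_size ≤ n·ch`, `≤ 8192` (so neither the 32-bit `imul` / `add` nor the `idiv` overflows). -/
theorem factK_A {u₀ : State} {g : G} (he : Entered u₀ g) {v : State} (c : Common u₀ g v) (h2 : g.rtype = 2)
    (hch : 2 ≤ g.ch) {pc : Nat} (hpc : pc < g.PRD) :
    1 ≤ Residue.part_size v.mem g.r ∧
    Residue.begin v.mem g.r + pc * Residue.part_size v.mem g.r + Residue.part_size v.mem g.r ≤ g.n * g.ch ∧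
    Residue.begin v.mem g.r + pc * Residue.part_size v.mem g.r + Residue.part_size v.mem g.r ≤ 8192 := by
  have hres := c.resAt he
  have hb := arg_bounds he
  have e := c.prd
  rw [h2] at e
  have hK := Residue.factK hres (A := Res.actualDec 2 g.n) (pc := pc) (by rw [e]; exact hpc)
  have ha := Res.actualDec_le 2 g.n
  refine ⟨hres.R5.1, ?_, by omega⟩
  apply Residue.factK_pos hres hch
  rw [e]
  exact hpc

/-- Every allocated block is kept by stores into `ownWins` (no allocated block meets the stack region). -/
theorem blks_kept_of_stack {u₀ : State} {g : G} (he : Entered u₀ g) {m m' : Mem} (hs : Mem.SameExcept (ownWins g) m m') :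
    AllKept g.Blk m m' := by
  apply AllKept.of_sameExcept he.pre.env.ok hs
  intro B hB
  exact ownWins_off g he.room (he.pre.free.offStack B hB)

/-- The temp block is kept by stores into `ownWins` (it lies in the arena, off the stack). -/
theorem tb_kept_of_stack {u₀ : State} {g : G} (he : Entered u₀ g) {v : State} (c : Common u₀ g v) {m' : Mem}
    (hs : Mem.SameExcept (ownWins g) v.mem m') : g.TB.Kept v.mem m' := by
  have hb : ADOBusy g.A' g.others' v.mem g.f g.sz := c.point.busy
  have ht := hb.ok.tblock_off c.tblock
  apply Block.Kept.of_sameExcept hs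
  · exact ownWins_off g he.room (by omega)
  · omega

/-- The record's reads are kept by stores into `ownWins`. -/
theorem reads_of_stack {u₀ : State} {g : G} (he : Entered u₀ g) {v : State} (c : Common u₀ g v) {m' : Mem}
    (hs : Mem.SameExcept (ownWins g) v.mem m') : ResidueReads v.mem g.f m' g.f g.r := by
  have hroom := he.room
  have hak := blks_kept_of_stack he hs
  have hob : g.Blk (objBlock g.f) := he.vorbis.obj
  have hobst := he.pre.free.offStack _ hob
  have hobin := he.pre.env.ok.inside _ hob
  simp only [vblock, voff] at hobst hobin
  have hv : Real.VorbisOK g.len g.Blk v.mem g.f := c.point.vorbis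
  have hcfg := hv.config
  have hR : ResidueOK g.Blk v.mem g.f := hv.residue
  have hres := c.resAt he
  apply ResidueReads.of_kept
  · apply ObjEq.of_sameExcept hs
    · intro w hw
      have := (by decide : WinsBelow ResidueAtOK.wins 1808) w hw
      omega
    · intro w hw s hsp
      have hb' := (by decide : WinsBelow ResidueAtOK.wins 1808) w hw
      exact ownWins_off g hroom (lo := g.f + w.1) (hi := g.f + w.2) (by omega) s hsp
  · -- the record lies in the `residue_config` block
    have hlt := c.rn_lt he
    have h1 := hR.R1
    have hlt' : g.rn < (stb_vorbis.residue_count v.mem g.f).toNat := by omega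
    have er := c.config_at
    apply (hak _ hR.R2).mono
    · show stb_vorbis.residue_config v.mem g.f ≤ g.r
      rw [← er]
      unfold stb_vorbis.residue_config_at
      omega
    · show g.r + Off.sizeof.Residue ≤
        stb_vorbis.residue_config v.mem g.f + Off.sizeof.Residue * (stb_vorbis.residue_count v.mem g.f).toNat
      rw [← er]
      unfold stb_vorbis.residue_config_at
      simp only [voff]
      omega
  · -- the class book's header lies in the codebooks block
    have h7 := hres.R7
    have hlt' : Residue.classbook v.mem g.r < (stb_vorbis.codebook_count v.mem g.f).toNat := by omega
    apply (hak _ hcfg.cb0.F2).mono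
    · show stb_vorbis.codebooks v.mem g.f ≤ Residue.cbk v.mem g.f g.r
      unfold Residue.cbk stb_vorbis.codebooks_at
      omega
    · show Residue.cbk v.mem g.f g.r + 8 ≤
        stb_vorbis.codebooks v.mem g.f + Off.sizeof.Codebook * (stb_vorbis.codebook_count v.mem g.f).toNat
      unfold Residue.cbk stb_vorbis.codebooks_at
      simp only [voff]
      omega

/-- FILL of a row of the temp block is kept by stores into `ownWins`. -/
theorem fill_of_stack {u₀ : State} {g : G} (he : Entered u₀ g) {v : State} (c : Common u₀ g v) {m' : Mem}
    (hs : Mem.SameExcept (ownWins g) v.mem m') {j m : Nat} (hj : j < g.C) (hm : m ≤ g.PRD)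
    (h : Fill v.mem g.f g.r g.TB g.C g.PRD j m) : Fill m' g.f g.r g.TB g.C g.PRD j m := by
  apply h.frame hj hm c.tb.size (tb_kept_of_stack he c hs) (reads_of_stack he c hs)
  exact blks_kept_of_stack he hs _ (c.resAt he).R8a

/-- WA is kept by stores into `ownWins` (`3 ≤ ch ≤ C`: row 0 exists). -/
theorem winv_of_stack {u₀ : State} {g : G} (he : Entered u₀ g) {v : State} (c : Common u₀ g v) {m' : Mem}
    (hs : Mem.SameExcept (ownWins g) v.mem m') (hC : 1 ≤ g.C) {pass cs pcount : Nat}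
    (h : WInv v.mem g.f g.r g.TB g.C g.PRD g.W g.rowsA pass cs pcount) :
    WInv m' g.f g.r g.TB g.C g.PRD g.W g.rowsA pass cs pcount := by
  apply h.frame (fun j hj => hj) _ (c.w_pos he)
  intro j m hj hf hm
  have e : j = 0 := hj
  exact fill_of_stack he c hs (by omega) hm hf

/-- The invariant of the i-loop is kept by stores into `ownWins`. -/
theorem winner_of_stack {u₀ : State} {g : G} (he : Entered u₀ g) {v : State} (c : Common u₀ g v) {m' : Mem}
    (hs : Mem.SameExcept (ownWins g) v.mem m') (hC : 1 ≤ g.C) {pass cs i pcount : Nat}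
    (h : WInnerInv v.mem g.f g.r g.TB g.C g.PRD g.W g.rowsA pass cs i pcount) :
    WInnerInv m' g.f g.r g.TB g.C g.PRD g.W g.rowsA pass cs i pcount := by
  apply h.frame (fun j hj => hj) _ (c.w_pos he)
  intro j m hj hf hm
  have e : j = 0 := hj
  exact fill_of_stack he c hs (by omega) hm hf

/-- `part_read ≤ actual_size ≤ 2·n ≤ 8192`. -/
theorem prd_le {u₀ : State} {g : G} (he : Entered u₀ g) : g.PRD ≤ 8192 := by
  have hb := arg_bounds he
  have ha := Res.actualDec_le (stb_vorbis.residue_types g.e.mem g.f g.rn) g.n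
  have h := Res.partRead_le (Residue.begin g.e.mem g.r) (Residue.end_ g.e.mem g.r) (Residue.part_size g.e.mem g.r)
    (Res.actualDec (stb_vorbis.residue_types g.e.mem g.f g.rn) g.n)
  have e : g.PRD = Res.partRead (Residue.begin g.e.mem g.r) (Residue.end_ g.e.mem g.r) (Residue.part_size g.e.mem g.r)
    (Res.actualDec (stb_vorbis.residue_types g.e.mem g.f g.rn) g.n) := rfl
  omega

/-- The low half of the word of a small number. -/
theorem part32_small6 (n : Nat) (h : n < 2 ^ 32) : Word.part Width.w32 (UInt64.ofNat n) = BitVec.ofNat 32 n := by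
  apply BitVec.eq_of_toNat_eq
  rw [Asan.part32_toNat, UInt64.toNat_ofNat', BitVec.toNat_ofNat, Nat.mod_eq_of_lt (by omega : n < 2 ^ 64)]

/-- **`z = r->begin + pcount * r->part_size`** as the walker computes it (`imul eax, …` ; `add eax, ebx`): the 32-bit vector of
the number (no bound is needed: `BitVec.ofNat` is a ring homomorphism). -/
theorem z32 (pcount psz bg : Nat) (h : pcount < 2 ^ 32) :
    Word.part Width.w32 (UInt64.ofNat pcount) * BitVec.ofNat 32 psz + BitVec.ofNat 32 bg =
      BitVec.ofNat 32 (bg + pcount * psz) := by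
  rw [part32_small6 pcount h, ← BitVec.ofNat_mul, ← BitVec.ofNat_add, Nat.add_comm]

/-- The signed value of a small number's 32-bit vector. -/
theorem toInt_small32 (n : Nat) (h : n < 2 ^ 31) : (BitVec.ofNat 32 n).toInt = (n : Int) := by
  have e : (BitVec.ofNat 32 n).toNat = n := by
    rw [BitVec.toNat_ofNat]
    exact Nat.mod_eq_of_lt (by omega)
  rw [toInt_of_lt _ (by omega), e]

/-- The word of a stack address `RA − k`. -/
theorem addr_slot (g : G) (hroom : 0x700000 + 848 ≤ g.RA) (k : Nat) (hk : k ≤ 848) :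
    addr (g.RA - k) = g.e.reg .rsp - UInt64.ofNat k :=
  (eq_addr _ _ (toNat_slot6 g hroom k hk)).symm

/-- `PathA` (the pass, `tap` and `n` slots) is kept by stores into `ownWins`. -/
theorem patha_of_stack {u₀ : State} {g : G} (he : Entered u₀ g) {v v' : State} (hs : Mem.SameExcept (ownWins g) v.mem v'.mem)
    {pass : Nat} (p : PathA g pass v) : PathA g pass v' := by
  have hroom := he.room
  refine ⟨p.rtype2, p.ch_ge, p.pass_le, ?_, ?_, ?_⟩
  · exact (stack_read hroom hs 168 4 (by omega) (by omega) (by omega)).trans p.sl_pass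
  · exact (stack_read hroom hs 228 4 (by omega) (by omega) (by omega)).trans p.sl_tap
  · exact (stack_read hroom hs 208 4 (by omega) (by omega) (by omega)).trans p.sl_n

/-- **CI from the two ints just stored**: `c_inter = z % ch`, `p_inter = z / ch` read back from the frame, `z ≤ n·ch`. -/
theorem inter_of_z {u₀ : State} {g : G} (he : Entered u₀ g) {m : Mem} {z : Nat} (hch : 1 ≤ g.ch) (hz : z ≤ g.n * g.ch)
    (hz31 : z < 2 ^ 31)
    (hc : m.readLE (g.e.reg .rsp - 104) 4 = z % g.ch) (hp : m.readLE (g.e.reg .rsp - 88) 4 = z / g.ch) :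
    InterAt m g.ci g.pi g.ch g.n := by
  have hroom := he.room
  have hq : z / g.ch ≤ z := Nat.div_le_self _ _
  have hr : z % g.ch ≤ z := Nat.mod_le _ _
  apply InterAt.of_z hch hz
  · unfold Mem.i32 Mem.u32 G.ci
    rw [addr_slot g hroom.1 104 (by omega)]
    show sint32 (m.readLE (g.e.reg .rsp - 104) 4) = _
    rw [hc]
    unfold sint32
    rw [if_pos (by omega)]
  · unfold Mem.i32 Mem.u32 G.pi
    rw [addr_slot g hroom.1 88 (by omega)]
    show sint32 (m.readLE (g.e.reg .rsp - 88) 4) = _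
    rw [hp]
    unfold sint32
    rw [if_pos (by omega)]

/-- The `setl` / `test` pair of a signed comparison: the byte is 0 iff the comparison fails. -/
theorem setl_zero (a b : Int) : (if a < b then (1 : BitVec 8) else 0).toNat = 0 ↔ ¬ a < b := by
  split
  · simp_all
  · simp_all

/-- `classwords` is the value of an `int`: below 2^31. -/
theorem w_lt (g : G) : g.W < 2 ^ 31 := by
  have e : g.W = (sint32 (g.e.mem.u32 (Residue.cbk g.e.mem g.f g.r + Off.Codebook.dimensions))).toNat := rfl
  rcases sint32_cases (g.e.mem.u32 (Residue.cbk g.e.mem g.f g.r + Off.Codebook.dimensions)) with ⟨h1, h2⟩ | ⟨h1, h2⟩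
  · rw [e, h2]
    omega
  · have hlt : g.e.mem.u32 (Residue.cbk g.e.mem g.f g.r + Off.Codebook.dimensions) < 2 ^ 32 := by
      unfold Mem.u32
      exact Mem.readLE_lt _ _ 4
    rw [e, h2]
    omega

/-- **`&c_inter` and `&p_inter` are check sites** (the objects of the own protected frame, `base + 48` and `base + 64` with
`base = RA − 152`): `DeintPre.cpSite`, `DeintPre.ppSite` of the call at 0x10f538. `hroom`: `Entered.room`. -/
theorem ints_site {u₀ : State} {g : G} (he : Entered u₀ g) {v : State} (c : Common u₀ g v) :
    Site g.Live' g.ci 4 ∧ Site g.Live' g.pi 4 := by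
  have hroom := he.room
  have hF : (g.RA - 152, Vorbis.Frames.decode_residue) ∈ g.frames' := List.mem_cons_self ..
  constructor
  · have ho : (⟨g.RA - 152 + 48, 4, .stack⟩ : Obj) ∈ Vorbis.Frames.decode_residue.objsAt (g.RA - 152) := by
      unfold FrameLayout.objsAt Vorbis.Frames.decode_residue
      simp only [List.map_cons, List.mem_cons, true_or]
    have hl := c.shadow.live_frame hF ho
    apply Site.of_block hl
    · show g.RA - 152 + 48 ≤ g.ci
      unfold G.ci
      omega
    · show g.ci + 4 ≤ g.RA - 152 + 48 + 4
      unfold G.ci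
      omega
    · omega
  · have ho : (⟨g.RA - 152 + 64, 4, .stack⟩ : Obj) ∈ Vorbis.Frames.decode_residue.objsAt (g.RA - 152) := by
      unfold FrameLayout.objsAt Vorbis.Frames.decode_residue
      simp only [List.map_cons, List.mem_cons, true_or, or_true]
    have hl := c.shadow.live_frame hF ho
    apply Site.of_block hl
    · show g.RA - 152 + 64 ≤ g.pi
      unfold G.pi
      omega
    · show g.pi + 4 ≤ g.RA - 152 + 64 + 4
      unfold G.pi
      omega
    · omega

/-- **The table `residue_buffers[0 .. ch)` is a check site** in the live set inside the function (`DeintPre.table`; the load8 of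
`residue_buffers[j]`): P2's `rb_live`, the live lists have grown. -/
theorem rb_site {u₀ : State} {g : G} (he : Entered u₀ g) (hch : 1 ≤ g.ch) : Site g.Live' g.rb (8 * g.ch) := by
  have hl : LiveIn g.others' g.frames' g.rb (8 * g.ch) := by
    apply he.args.rb_live.mono
    intro o ho
    unfold G.frames' G.others'
    rw [stackObjs_cons]
    rcases List.mem_append.mp ho with h | h
    · exact List.mem_append_left _ (List.mem_append_right _ h)
    · exact List.mem_append_right _ (List.mem_cons_of_mem _ h)
  exact (LiveBytes.of_liveIn hl).site g.rb (8 * g.ch) (Nat.le_refl _) (Nat.le_refl _) (by omega)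

/-- **`∀ k < ch: outputs[k] = NULL ∨ Block(outputs[k], ≥ 4·n)`** (`DeintPre.outs` of the call at 0x10f538) in any memory that
differs from the entry memory inside the footprint only: P2 (`Args.null`, `Args.buf`: a channel buffer `Block(·, 4·b1)`,
`2·n ≤ b1`), the caller's array read as at the entry (`Entered.reads`). -/
theorem outs_of {u₀ : State} {g : G} (he : Entered u₀ g) {m : Mem}
    (hsame : Mem.SameExcept (g.spec.footprint g.e) g.e.mem m) :
    ∀ k, k < g.ch → m.ptr (g.rb + 8 * k) = 0 ∨ ∃ sz, 4 * g.n ≤ sz ∧ g.Blk ⟨m.ptr (g.rb + 8 * k), sz⟩ := by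
  intro k hk
  have hrb := (he.reads hsame).2.2 k hk
  have hargs := he.args
  by_cases hd : DND g.e.mem g.dnd k
  · left
    rw [hrb]
    exact hargs.null k hk hd
  · right
    obtain ⟨c, hc, hptr, _⟩ := hargs.buf k hk hd
    have hn := hargs.n_le
    refine ⟨4 * bsize g.e.mem g.f 1, by omega, ?_⟩
    rw [hrb, hptr]
    exact SampleBuf.blk he.vorbis.config (SampleBuf.chan c hc)

/-- **A non-NULL output pointer is a channel buffer**: the window `outputs[k][0 .. n)` of the callee lies inside a sample buffer
of the ENTRY memory (so SEP of the entry memory keeps it apart from `*f` and from every configuration block, and it is a window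
of `DecodeResidue.writes`). -/
theorem out_window {u₀ : State} {g : G} (he : Entered u₀ g) {m : Mem}
    (hsame : Mem.SameExcept (g.spec.footprint g.e) g.e.mem m) {k : Nat} (hk : k < g.ch)
    (hne : m.ptr (g.rb + 8 * k) ≠ 0) :
    ∃ c : Nat, c < nchan g.e.mem g.f ∧ m.ptr (g.rb + 8 * k) = stb_vorbis.channel_buffers g.e.mem g.f c ∧
      4 * g.n ≤ 4 * bsize g.e.mem g.f 1 ∧
      SampleBuf g.Blk g.e.mem g.f ⟨stb_vorbis.channel_buffers g.e.mem g.f c, 4 * bsize g.e.mem g.f 1⟩ := by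
  have hrb := (he.reads hsame).2.2 k hk
  have hargs := he.args
  by_cases hd : DND g.e.mem g.dnd k
  · exact absurd (hrb.trans (hargs.null k hk hd)) hne
  · obtain ⟨c, hc, hptr, _⟩ := hargs.buf k hk hd
    have hn := hargs.n_le
    have h1 := he.vorbis.header.HD1
    refine ⟨c, ?_, hrb.trans hptr, by omega, SampleBuf.chan c hc⟩
    rw [nchan_def]
    omega

/-- **A channel buffer of the entry memory is a window of decode_residue's footprint** (the `List.range … map` part of
`DecodeResidue.writes`): with `out_window`, every NON-NULL window of the callee's footprint lies inside one of ours — what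
`Common.same` after the call needs once the NULL windows are gone from `deint.wins` (the fix proposed in RESULT.json). -/
theorem chan_in_footprint {g : G} {c : Nat} (hc : c < nchan g.e.mem g.f) :
    (⟨stb_vorbis.channel_buffers g.e.mem g.f c, stb_vorbis.channel_buffers g.e.mem g.f c + 4 * bsize g.e.mem g.f 1⟩ : Span) ∈
      g.spec.footprint g.e := by
  unfold Spec.footprint
  apply List.mem_cons_of_mem
  show _ ∈ DecodeResidue.writes g.A g.e
  unfold DecodeResidue.writes
  apply List.mem_append_right
  exact List.mem_map.mpr ⟨c, List.mem_range.mpr hc, rfl⟩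


/-- **A non-NULL output pointer is a channel buffer of the PRESENT memory** `m` (a memory that differs from the entry memory inside
the footprint only): `channels`, `channel_buffers[c]`, `blocksize_1` read as at the entry (`DecodeSame`). -/
theorem out_window_m {u₀ : State} {g : G} (he : Entered u₀ g) {m : Mem}
    (hsame : Mem.SameExcept (g.spec.footprint g.e) g.e.mem m) (hd : DecodeSame g.f g.e.mem m) {k : Nat} (hk : k < g.ch)
    (hne : m.ptr (g.rb + 8 * k) ≠ 0) :
    ∃ c : Nat, m.ptr (g.rb + 8 * k) = stb_vorbis.channel_buffers m g.f c ∧ 4 * g.n ≤ 4 * bsize m g.f 1 ∧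
      SampleBuf g.Blk m g.f ⟨stb_vorbis.channel_buffers m g.f c, 4 * bsize m g.f 1⟩ := by
  obtain ⟨c, hc, hptr, hn, _⟩ := out_window he hsame hk hne
  have h16 := (arg_bounds he).2.2
  have hc16 : c < 16 := by
    have e : g.C = nchan g.e.mem g.f := rfl
    omega
  have ech : stb_vorbis.channels m g.f = stb_vorbis.channels g.e.mem g.f := by
    simp only [vacc, voff]
    exact hd.i32 4 (by decide)
  have ecb : stb_vorbis.channel_buffers m g.f c = stb_vorbis.channel_buffers g.e.mem g.f c := by
    simp only [vacc, voff]
    exact hd.u64_elem 144 1000 (by decide) 872 c (by omega) (by omega)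
  have eb1 : stb_vorbis.blocksize_1 m g.f = stb_vorbis.blocksize_1 g.e.mem g.f := by
    simp only [vacc, voff]
    exact hd.i32 156 (by decide)
  have ebs : bsize m g.f 1 = bsize g.e.mem g.f 1 := by
    rw [bsize_one, bsize_one, eb1]
  refine ⟨c, ?_, ?_, ?_⟩
  · rw [ecb]
    exact hptr
  · rw [ebs]
    exact hn
  · apply SampleBuf.chan c
    rw [ech]
    rw [nchan_def] at hc
    have h1 := he.vorbis.header.HD1
    omega

/-- **`DeintApart` at the call 0x10f538** (`DeintPre.apart`), in the memory `m` of the callee's entry: the two ints are the objects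
of the own frame (`RA − 104`, `RA − 88`: off `*f`, which is off the stack); a non-NULL output window is a prefix of a channel
buffer: SEP keeps it apart from `*f`, from the codebooks block, from every `sorted_values` block; it is off the stack, where the
table and the two ints are. -/
theorem deintApart_of {u₀ : State} {g : G} (he : Entered u₀ g) {m : Mem}
    (hsame : Mem.SameExcept (g.spec.footprint g.e) g.e.mem m) (hbits : Bits g.Blk g.len m g.f) {b : Nat}
    (hb : (b : Int) < stb_vorbis.codebook_count m g.f) :
    DeintApart m g.f (stb_vorbis.codebooks_at m g.f b) g.rb g.ch g.ci g.pi g.n := by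
  obtain ⟨hv, hsep, hd⟩ := he.frame hsame hbits
  have hcfg := hv.config
  have hroom := he.room
  have hob : g.Blk (objBlock g.f) := he.vorbis.obj
  have hobst := he.pre.free.offStack _ hob
  simp only [vblock, voff] at hobst
  have hrbst := he.args.rb_stack
  have eRA : g.RA = (g.e.reg .rsp).toNat := rfl
  -- a non-NULL window: inside a channel buffer, which is an allocated block off the stack
  have hwin : ∀ k, k < g.ch → m.ptr (g.rb + 8 * k) ≠ 0 →
      ∃ C : Block, SampleBuf g.Blk m g.f C ∧ C.base = m.ptr (g.rb + 8 * k) ∧ 4 * g.n ≤ C.size ∧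
        (C.base + C.size ≤ 0x700000 ∨ 0x800000 ≤ C.base) := by
    intro k hk hne
    obtain ⟨c, hptr, hn, hC⟩ := out_window_m he hsame hd hk hne
    refine ⟨_, hC, hptr.symm, hn, ?_⟩
    exact he.pre.free.offStack _ (SampleBuf.blk hcfg hC)
  refine ⟨?_, ?_, ?_, ?_, ?_, ?_, ?_, ?_, ?_, he.deint_tableObj⟩
  · show g.ci + 4 ≤ g.pi ∨ g.pi + 4 ≤ g.ci
    unfold G.ci G.pi
    omega
  · simp only [vblock, voff]
    unfold G.ci
    omega
  · simp only [vblock, voff]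
    unfold G.pi
    omega
  · intro k hk hne
    obtain ⟨C, hC, e1, e2, _⟩ := hwin k hk hne
    have hdj := hsep.bufobj C hC
    unfold deint.window
    simp only [vblock, voff] at hdj ⊢
    omega
  · intro k hk hne
    obtain ⟨C, hC, e1, e2, _⟩ := hwin k hk hne
    have hdj := hsep.buf _ ConfigOK.Reads.codebooks C hC
    have hin := hcfg.cb0.cb_in b hb
    unfold deint.window
    simp only [vblock, voff] at hdj hin ⊢
    omega
  · intro k hk hne hse
    obtain ⟨C, hC, e1, e2, _⟩ := hwin k hk hne
    have hdj := hsep.buf _ (ConfigOK.Reads.sorted_values b hb hse) C hC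
    unfold deint.window
    simp only [vblock] at hdj ⊢
    omega
  · intro k hk hne
    obtain ⟨C, hC, e1, e2, e3⟩ := hwin k hk hne
    unfold deint.window
    simp only [vblock]
    omega
  · intro k hk hne
    obtain ⟨C, hC, e1, e2, e3⟩ := hwin k hk hne
    unfold deint.window
    simp only [vblock]
    unfold G.ci
    omega
  · intro k hk hne
    obtain ⟨C, hC, e1, e2, e3⟩ := hwin k hk hne
    unfold deint.window
    simp only [vblock]
    unfold G.pi
    omega


/-- **THE PRECONDITION OF THE CALL at 0x10f538** (and of the one at 0x10f18e in decode_residue.4) from the assertions: `v` is the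
last state with COMMON (its shadow layer), `s` the callee's first instruction: `rsp = RA − 272` (two pushes and the return
address below the steady stack pointer), `rdi = f`, `rsi = f->codebooks + b` with `b < codebook_count` (R8c), `rdx =
residue_buffers`, `ecx = ch`, `r8 = &c_inter`, `r9 = &p_inter`, `[rsp + 8] = n`, `[rsp + 16] = part_size ≥ 1`, CI; the memory of
`s` differs from the entry memory inside the footprint only and no shadow byte was written since `v`. -/
theorem deintPre_of {u₀ : State} {g : G} (he : Entered u₀ g) {v s : State} (c : Common u₀ g v)
    (hsame : Mem.SameExcept (g.spec.footprint g.e) g.e.mem s.mem) (hbits : Bits g.Blk g.len s.mem g.f)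
    (hun : ShadowUntouched v.mem s.mem) (hch3 : 3 ≤ g.ch)
    (hrsp : (s.reg .rsp).toNat = g.RA - 272) (hrdi : (s.reg .rdi).toNat = g.f) {b : Nat}
    (hb : (b : Int) < stb_vorbis.codebook_count s.mem g.f) (hrsi : (s.reg .rsi).toNat = stb_vorbis.codebooks_at s.mem g.f b)
    (hrdx : (s.reg .rdx).toNat = g.rb) (hrcx : argU32 (s.reg .rcx) = g.ch) (hr8 : (s.reg .r8).toNat = g.ci)
    (hr9 : (s.reg .r9).toNat = g.pi) (hlen : s.mem.u32 (g.RA - 264) = g.n) (htot : 1 ≤ s.mem.i32 (g.RA - 256))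
    (hinter : InterAt s.mem g.ci g.pi g.ch g.n) : DeintPre g.others' g.frames' g.Blk g.len s := by
  obtain ⟨hv, hsep, hd⟩ := he.frame hsame hbits
  have hcfg := hv.config
  have hroom := he.room
  have hal := he.entry.align
  have eRA : (g.e.reg .rsp).toNat = g.RA := rfl
  have hbnd := arg_bounds he
  have hsites := ints_site he c
  have hinv := c.shadow.untouched hun
  have e8 : (s.reg .rsp).toNat + 8 = g.RA - 264 := by omega
  have e16 : (s.reg .rsp).toNat + 16 = g.RA - 256 := by omega
  have e24 : (s.reg .rsp).toNat + 24 = g.RA - 248 := by omega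
  have hsh : ShadowPre g.others' g.frames' s := by
    refine ⟨?_, he.offText'⟩
    rw [e8]
    exact hinv.lower (by omega) (by omega) (by omega)
  refine ⟨⟨⟨hsh, ?_, ?_⟩, he.pre.env.ok, ?_, ?_, ?_⟩, ?_, ?_, ?_, ?_, ?_, ?_, ?_, ?_, ?_, ?_, ?_⟩
  · rw [hrdi]
    exact he.reader'
  · rw [hrdi]
    exact hbits
  · -- the struct at `c` lies inside the codebooks block
    rw [hrsi]
    exact ⟨_, hcfg.cb0.F2, hcfg.cb0.cb_in b hb⟩
  · rw [hrsi]
    exact hcfg.books b hb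
  · rw [hrdi, hrsi]
    exact he.bookApart hsame b hb
  · rw [e24]
    exact hinv
  · rw [hrcx]
    omega
  · rw [hrcx]
    omega
  · rw [e8, hlen]
    omega
  · rw [e16]
    exact htot
  · rw [hr8]
    exact hsites.1
  · rw [hr9]
    exact hsites.2
  · rw [hr8, hr9, hrcx, e8, hlen]
    exact hinter
  · rw [hrdx, hrcx]
    exact rb_site he (by omega)
  · rw [hrcx, hrdx, e8, hlen]
    exact outs_of he hsame
  · rw [hrdi, hrsi, hrdx, hrcx, hr8, hr9, e8, hlen]
    exact deintApart_of he hsame hbits hb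


/-- **The footprint, `Bits` and the shadow over stores into the own frame**, for a MEMORY (not a state: at the callee's first
instruction the stack pointer is not the steady one, so `common_of_stack` does not apply): the three hypotheses `hsame`, `hbits`,
`hun` of `deintPre_of` from COMMON at the last cut and the walker's `Mem.SameExcept (ownWins g) v.mem s.mem` (`u_same`). -/
theorem frame_of_stack {u₀ : State} {g : G} (he : Entered u₀ g) {v : State} (c : Common u₀ g v) {m : Mem}
    (hs : Mem.SameExcept (ownWins g) v.mem m) :
    Mem.SameExcept (g.spec.footprint g.e) g.e.mem m ∧ Bits g.Blk g.len m g.f ∧ ShadowUntouched v.mem m := by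
  have hroom := he.room
  have hob : g.Blk (objBlock g.f) := he.vorbis.obj
  have hobst := he.pre.free.offStack _ hob
  have hobin := he.pre.env.ok.inside _ hob
  simp only [vblock, voff] at hobst hobin
  have offObj : ∀ lo hi : Nat, g.f ≤ lo → hi ≤ g.f + 1808 → ∀ w, w ∈ ownWins g → hi ≤ w.lo ∨ w.hi ≤ lo := by
    intro lo hi h1 h2
    exact ownWins_off g hroom (by omega)
  refine ⟨?_, ?_, ?_⟩
  · apply c.same.trans
    apply hs.mono
    intro w hw a h1 h2
    have hw' := ownWins_stack g hroom.1 w hw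
    refine ⟨⟨(g.e.reg .rsp).toNat - 848, (g.e.reg .rsp).toNat⟩, ?_, ?_, ?_⟩
    · unfold Spec.footprint
      exact List.mem_cons_self ..
    · show (g.e.reg .rsp).toNat - 848 ≤ a
      have e : (g.e.reg .rsp).toNat = g.RA := rfl
      omega
    · show a < (g.e.reg .rsp).toNat
      have e : (g.e.reg .rsp).toNat = g.RA := rfl
      omega
  · apply c.point.vorbis.bits.frame_fields
    apply Bits.SameFields.of_sameExcept hs
    · exact offObj _ _ (by omega) (by omega)
    · exact offObj _ _ (by omega) (by omega)
    · exact offObj _ _ (by omega) (by omega)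
    · exact offObj _ _ (by omega) (by omega)
  · exact hs.eqOn _ _ (ownWins_off g hroom (by omega))

/-! ### The call arm (decode_residue.6bb): the walk to the call, the frame work after it, the two exits -/

set_option maxRecDepth 4000
set_option maxHeartbeats 4000000

/-- **Where `*f` is**: in the data space, off the stack region. -/
theorem obj_where6 {u₀ : State} {g : G} (hent : Entered u₀ g) :
    0x100000 ≤ g.f ∧ g.f + 1808 ≤ 0xC00000 ∧ (g.f + 1808 ≤ 0x700000 ∨ 0x800000 ≤ g.f) := by
  have hob : g.Blk (objBlock g.f) := hent.vorbis.obj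
  have hin := hent.pre.env.ok.inside _ hob
  have hst := hent.pre.free.offStack _ hob
  simp only [vblock, voff] at hin hst
  omega

/-- **A field of `*f`** is a check site (OB1). -/
theorem f_site {u₀ : State} {g : G} {v : State} (hc : Common u₀ g v) (off n : Nat)
    (hoff : off + n ≤ 1808) (hn : 1 ≤ n) : Site g.Live' (g.f + off) n := by
  have hv : Real.VorbisOK g.len g.Blk v.mem g.f := hc.point.vorbis
  have hL : BlkLive g.Blk g.Live' := hc.point.env.live
  exact hv.bits.site_field hL off n hoff hn rfl

/-- **Where a window of the call of codebook_decode_deinterleave_repeat may lie** (its stack frame, the reader's windows of `*f`, the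
two ints of the own protected frame, the argument slot `total_decode`, a non-NULL output window): below the steady stack pointer;
`c_inter`; `p_inter`; a window of `bookWins f`; inside a channel buffer of the entry memory. -/
def CallWin6 (g : G) (w : Span) : Prop :=
  (g.RA - 848 ≤ w.lo ∧ w.hi ≤ g.RA - 248) ∨
  w = ⟨g.RA - 104, g.RA - 100⟩ ∨
  w = ⟨g.RA - 88, g.RA - 84⟩ ∨
  w ∈ bookWins g.f ∨
  ∃ c : Nat, (c : Int) < stb_vorbis.channels g.e.mem g.f ∧ stb_vorbis.channel_buffers g.e.mem g.f c ≤ w.lo ∧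
    w.hi ≤ stb_vorbis.channel_buffers g.e.mem g.f c + 4 * bsize g.e.mem g.f 1

/-- **Every window of the call's footprint is a `CallWin6`**: `s` is the state at the callee's first instruction, its argument
registers named by the ghosts (as in `Entered.deint_wins_inside`); `⟨lo, hi⟩` is the callee's stack window. -/
theorem callWin6_of_mem {u₀ : State} {g : G} (he : Entered u₀ g) {s : State} {lo hi : Nat}
    (hsame : Mem.SameExcept (g.spec.footprint g.e) g.e.mem s.mem)
    (hrsp : (s.reg .rsp).toNat = g.RA - 272) (hrdi : (s.reg .rdi).toNat = g.f) (hrdx : (s.reg .rdx).toNat = g.rb)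
    (hrcx : argU32 (s.reg .rcx) = g.ch) (hr8 : (s.reg .r8).toNat = g.ci) (hr9 : (s.reg .r9).toNat = g.pi)
    (hlen : s.mem.u32 (g.RA - 264) = g.n) (hlo : g.RA - 848 ≤ lo) (hhi : hi ≤ g.RA - 248) :
    ∀ w, w ∈ (⟨lo, hi⟩ : Span) :: deint.wins s → CallWin6 g w := by
  intro w hw
  have hroom := he.room
  have e8 : (s.reg .rsp).toNat + 8 = g.RA - 264 := by omega
  rcases List.mem_cons.mp hw with hw0 | hw1
  · left
    rw [hw0]
    exact ⟨hlo, hhi⟩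
  rcases deint.wins_cases hw1 with hb | h8 | h9 | hslot | ⟨k, hk, hnz, hwin⟩
  · rw [hrdi] at hb
    exact Or.inr (Or.inr (Or.inr (Or.inl hb)))
  · right
    left
    rw [h8, hr8]
    unfold G.ci
    have e : g.RA - 104 + 4 = g.RA - 100 := by omega
    rw [e]
  · right
    right
    left
    rw [h9, hr9]
    unfold G.pi
    have e : g.RA - 88 + 4 = g.RA - 84 := by omega
    rw [e]
  · left
    rw [hslot, hrsp]
    simp only []
    omega
  · rw [hrcx] at hk
    rw [hrdx] at hnz hwin
    rw [e8, hlen] at hwin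
    obtain ⟨c, hc, hptr⟩ := he.deint_out_chan hsame hk hnz
    have hn := he.args.n_le
    have h1 := he.vorbis.header.HD1
    rw [nchan_def] at hc
    refine Or.inr (Or.inr (Or.inr (Or.inr ⟨c, by omega, ?_, ?_⟩)))
    · rw [hwin, hptr]
      exact Nat.le_refl _
    · rw [hwin, hptr]
      simp only []
      omega

/-- **What a `CallWin6` misses**: the temp block; the two arena windows of `*f` (`ADO.wins`); every slot `[RA − k, RA − k + n)` of
the own frame at or above the steady stack pointer that is not one of the two ints; and it is a legal decode-time store
(`StoreOK`) in the memory of a cut point. -/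
theorem callWin6_apart {u₀ : State} {g : G} (he : Entered u₀ g) {v : State} (c : Common u₀ g v) {w : Span}
    (hw : CallWin6 g w) :
    (g.TB.base + g.TB.size ≤ w.lo ∨ w.hi ≤ g.TB.base) ∧
    StoreOK g.Blk v.mem g.f w ∧
    (∀ a, a ∈ ADO.wins → g.f + a.2 ≤ w.lo ∨ w.hi ≤ g.f + a.1) ∧
    (∀ k n : Nat, n ≤ k → k ≤ 248 → (104 ≤ k - n ∨ k ≤ 100) → (88 ≤ k - n ∨ k ≤ 84) →
      g.RA - k + n ≤ w.lo ∨ w.hi ≤ g.RA - k) := by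
  have hroom := he.room
  have hpre := he.pre
  have hok := hpre.env.ok
  have hob : g.Blk (objBlock g.f) := he.vorbis.obj
  have hobst := hpre.free.offStack _ hob
  have hobgap := hpre.free.offGap _ hob
  have hobin := hok.inside _ hob
  simp only [vblock, voff] at hobst hobgap hobin
  have hcfg := he.vorbis.config
  have hbusy : ADOBusy g.A' g.others' v.mem g.f g.sz := c.point.busy
  have hTBr := hbusy.ok.tblock_range c.tblock
  have hTBoff := hbusy.ok.tblock_off c.tblock
  have hAR2 := he.ado.ok.AR2
  have hAR2' := hbusy.ok.AR2
  have eB : g.A'.B = g.A.B := rfl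
  have eL : g.A'.L = g.A.L := rfl
  have eS : g.A'.S = g.A.S := rfl
  have hr8 := le_r8 g.TB.size
  have eTB : g.TB.base = g.A'.B + g.A'.T := rfl
  have hado : ∀ a, a ∈ ADO.wins → a = (12, 16) ∨ a = (112, 136) := by
    intro a ha
    simp only [ADO.wins, List.mem_cons, List.mem_nil_iff, or_false] at ha
    exact ha
  rcases hw with ⟨h1, h2⟩ | rfl | rfl | hb | ⟨k, hk, hka, hkb⟩
  · -- the own stack below the steady stack pointer
    refine ⟨by omega, ?_, ?_, ?_⟩
    · apply StoreOK.off
      intro B hB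
      have := hpre.free.offStack B hB
      omega
    · intro a ha
      rcases hado a ha with rfl | rfl <;> simp only [] <;> omega
    · intro k n hn hk h104 h88
      omega
  · -- `c_inter`
    refine ⟨by simp only []; omega, ?_, ?_, ?_⟩
    · apply StoreOK.off
      intro B hB
      have := hpre.free.offStack B hB
      simp only []
      omega
    · intro a ha
      rcases hado a ha with rfl | rfl <;> simp only [] <;> omega
    · intro k n hn hk h104 h88
      simp only []
      omega
  · -- `p_inter`
    refine ⟨by simp only []; omega, ?_, ?_, ?_⟩
    · apply StoreOK.off
      intro B hB
      have := hpre.free.offStack B hB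
      simp only []
      omega
    · intro a ha
      rcases hado a ha with rfl | rfl <;> simp only [] <;> omega
    · intro k n hn hk h104 h88
      simp only []
      omega
  · -- a window of the bit reader inside `*f`
    unfold bookWins at hb
    simp only [List.mem_cons, List.mem_nil_iff, or_false] at hb
    refine ⟨?_, ?_, ?_, ?_⟩
    · rcases hb with rfl | rfl | rfl | rfl | rfl <;> simp only [] <;> omega
    · apply StoreOK.hole
      unfold InHole
      rcases hb with rfl | rfl | rfl | rfl | rfl <;> simp only [] <;> omega
    · intro a ha
      rcases hado a ha with rfl | rfl <;> rcases hb with rfl | rfl | rfl | rfl | rfl <;> simp only [] <;> omega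
    · intro k n hn hk h104 h88
      rcases hb with rfl | rfl | rfl | rfl | rfl <;> simp only [] <;> omega
  · -- inside a channel buffer
    have hC : SampleBuf g.Blk g.e.mem g.f ⟨stb_vorbis.channel_buffers g.e.mem g.f k, 4 * bsize g.e.mem g.f 1⟩ :=
      SampleBuf.chan k hk
    have hCblk := SampleBuf.blk hcfg hC
    have hCst := hpre.free.offStack _ hCblk
    have hCgap := hpre.free.offGap _ hCblk
    have hCobj := he.sep.bufobj _ hC
    simp only [vblock, voff] at hCst hCgap hCobj
    obtain ⟨ech, eb, eptr⟩ := ConfigOK.buffers_eq (c.obj.sub ConfigOK.wins_decode) hcfg.header.HD1.2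
    have hCv : SampleBuf g.Blk v.mem g.f ⟨stb_vorbis.channel_buffers g.e.mem g.f k, 4 * bsize g.e.mem g.f 1⟩ := by
      rw [← (eptr k hk).1, ← eb]
      exact SampleBuf.chan k (by rw [ech]; exact hk)
    refine ⟨by omega, StoreOK.buffer _ hCv hka hkb, ?_, ?_⟩
    · intro a ha
      rcases hado a ha with rfl | rfl <;> simp only [] <;> omega
    · intro k n hn hk h104 h88
      omega

/-- **The memory-level part of the assertions after the call**: in a memory `m` that differs from the memory of a COMMON state `v`
inside `CallWin6` windows only, with the callee's `Bits`, `μ` and `ShadowUntouched`: the shadow layer, `ADOBusy`, TB, `μ`, every slot of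
the own frame at or above the steady stack pointer other than the two ints, and the invariant of the i-loop. -/
theorem after_call6 {u₀ : State} {g : G} (he : Entered u₀ g) {v : State} (c : Common u₀ g v) {m : Mem} {ws : List Span}
    (hs : Mem.SameExcept ws v.mem m) (hws : ∀ w, w ∈ ws → CallWin6 g w)
    (hun : ShadowUntouched v.mem m) (hmu : mu m g.f ≤ mu v.mem g.f)
    (hsame : Mem.SameExcept (g.spec.footprint g.e) g.e.mem m) (hC : 1 ≤ g.C) :
    ShadowInv g.others' g.frames' (g.RA - 248) m ∧
    ADOBusy g.A' g.others' m g.f g.sz ∧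
    TempRows m g.TB g.C g.PRD ∧
    mu m g.f ≤ mu g.e.mem g.f ∧
    (∀ k n : Nat, n ≤ k → k ≤ 248 → (104 ≤ k - n ∨ k ≤ 100) → (88 ≤ k - n ∨ k ≤ 84) →
      m.readLE (g.e.reg .rsp - UInt64.ofNat k) n = v.mem.readLE (g.e.reg .rsp - UInt64.ofNat k) n) ∧
    (∀ pass cs i pcount, WInnerInv v.mem g.f g.r g.TB g.C g.PRD g.W g.rowsA pass cs i pcount →
      WInnerInv m g.f g.r g.TB g.C g.PRD g.W g.rowsA pass cs i pcount) := by
  have hroom := he.room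
  have hok := he.pre.env.ok
  have hob : g.Blk (objBlock g.f) := he.vorbis.obj
  have hobin := hok.inside _ hob
  simp only [vblock, voff] at hobin
  have hbusy : ADOBusy g.A' g.others' v.mem g.f g.sz := c.point.busy
  have hTBoff := hbusy.ok.tblock_off c.tblock
  have hTBr := hbusy.ok.tblock_range c.tblock
  have hr8 := le_r8 g.TB.size
  have hW := c.w_pos he
  -- the temp block is kept
  have hTBk : g.TB.Kept v.mem m := by
    apply Block.Kept.of_sameExcept hs
    · intro w hw
      exact (callWin6_apart he c (hws w hw)).1
    · omega
  -- the blocks the configuration reads are kept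
  have hvcfg : ConfigOK g.Blk v.mem g.f := (show Real.VorbisOK g.len g.Blk v.mem g.f from c.point.vorbis).config
  have hkept := StoreOK.reads_kept hvcfg hok c.sep hs (fun w hw => (callWin6_apart he c (hws w hw)).2.1)
  -- what the record reads, and the `classdata` table
  obtain ⟨hrd', _, _⟩ := he.reads hsame
  have hrd0 := c.reads
  have hrd : ResidueReads v.mem g.f m g.f g.r :=
    ⟨hrd'.begin.trans hrd0.begin.symm, hrd'.end_.trans hrd0.end_.symm, hrd'.part_size.trans hrd0.part_size.symm,
      hrd'.classifications.trans hrd0.classifications.symm, hrd'.classbook.trans hrd0.classbook.symm,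
      hrd'.classdata.trans hrd0.classdata.symm, hrd'.residue_books.trans hrd0.residue_books.symm,
      hrd'.codebook_count.trans hrd0.codebook_count.symm, hrd'.cbk.trans hrd0.cbk.symm, hrd'.E.trans hrd0.E.symm,
      hrd'.W.trans hrd0.W.symm⟩
  have hcd : (Block.mk (Residue.classdata v.mem g.r) (8 * Residue.E v.mem g.f g.r)).Kept v.mem m := by
    apply hkept
    apply ConfigOK.Reads.residue
    have h := ResidueOK.Owns.record (mem := v.mem) (f := g.f) g.rn (c.rn_lt he) _
      (ResidueAtOK.Owns.classdata (mem := v.mem) (f := g.f) (r := stb_vorbis.residue_config_at v.mem g.f g.rn))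
    rw [c.config_at] at h
    exact h
  refine ⟨c.shadow.untouched hun, ?_, ?_, Nat.le_trans hmu c.mu_le, ?_, ?_⟩
  · apply hbusy.transfer
    apply ObjEq.of_sameExcept hs
    · intro w hw
      simp only [ADO.wins, List.mem_cons, List.mem_nil_iff, or_false] at hw
      rcases hw with rfl | rfl <;> simp only [] <;> omega
    · intro a ha sp hsp
      exact (callWin6_apart he c (hws sp hsp)).2.2.1 a ha
  · apply c.tb.frame
    have hsz := c.tb.size
    have h3 : g.C * (8 + 8 * g.PRD) = g.C * 8 + g.C * (8 * g.PRD) := Nat.mul_add _ _ _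
    apply hTBk.mono
    · exact Nat.le_refl _
    · simp only []
      omega
  · intro k n hn hk h104 h88
    have e := toNat_slot6 g hroom.1 k (by omega)
    apply hs.readLE
    · rw [e]
      omega
    · intro w hw
      rw [e]
      exact (callWin6_apart he c (hws w hw)).2.2.2 k n hn hk h104 h88
  · intro pass cs i pcount hwi
    apply hwi.frame (fun j h => h) ?_ hW
    intro j mm hj hfill hm
    have e : j = 0 := hj
    exact hfill.frame (by omega) hm c.tb.size hTBk hrd hcd

/-- `movsx rsi, bx` of a non-negative 16-bit value is the value itself. -/
theorem sext16_small (b : Nat) (hb : b < 32768) :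
    Word.ofBV (BitVec.signExtend 64 (Word.part Width.w16 (UInt64.ofNat b))) = addr b := by
  have e : (Word.part Width.w16 (UInt64.ofNat b)).toNat = b := by
    unfold Word.part
    simp only [Width.bits, BitVec.toNat_setWidth, UInt64.toNat_toBitVec, UInt64.toNat_ofNat']
    omega
  have hmsb : (Word.part Width.w16 (UInt64.ofNat b)).msb = false := by
    rw [BitVec.msb_eq_decide]
    simp only [Width.bits, decide_eq_false_iff_not, Nat.not_le]
    simp only [Width.bits] at e
    omega
  apply eq_addr
  unfold Word.ofBV
  simp only [UInt64.toNat_ofBitVec, BitVec.toNat_setWidth, BitVec.toNat_signExtend]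
  simp only [hmsb, Bool.false_eq_true, if_false]
  simp only [Width.bits] at e ⊢
  omega

/-- **`rsi = f->codebooks + b`** as the walker computes it (`movsx rsi, bx ; imul rsi, 0x848 ; add rsi, [r14+0xa8]`). -/
theorem book_addr6 (b cbs : Nat) (hb : b < 32768) (hc : cbs + 2120 * b < 2 ^ 64) :
    (Word.ofBV (BitVec.signExtend 64 (Word.part Width.w16 (UInt64.ofNat b))) * 2120 + UInt64.ofNat cbs).toNat =
      cbs + 2120 * b := by
  rw [sext16_small b hb, addr_mul_lit]
  show (addr (b * 2120) + addr cbs).toNat = _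
  rw [addr_add_addr, toNat_addr _ (by omega)]
  omega

/-- A `push` of a zero-extended dword stores the dword's number. -/
theorem push32 (x : Nat) (hx : x < 2 ^ 32) : (BitVec.setWidth 64 (BitVec.ofNat 32 x)).toNat = x := by
  simp only [BitVec.toNat_setWidth, BitVec.toNat_ofNat]
  omega

/-- **The argument registers of the call at 0x10f538 as numbers**, from the walker's equations. -/
theorem call_regs6 {u₀ : State} {g : G} (he : Entered u₀ g) {s : State}
    (w_rsp : s.reg .rsp = g.e.reg .rsp - 272) (w_rdi : s.reg .rdi = g.e.reg .rdi) (w_rdx : s.reg .rdx = g.e.reg .rsi)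
    (w_rcx : s.reg .rcx = Word.ofBV (BitVec.ofNat 32 g.ch)) (w_r8 : s.reg .r8 = g.e.reg .rsp - 104)
    (w_r9 : s.reg .r9 = g.e.reg .rsp - 88) :
    (s.reg .rsp).toNat = g.RA - 272 ∧ (s.reg .rdi).toNat = g.f ∧ (s.reg .rdx).toNat = g.rb ∧ argU32 (s.reg .rcx) = g.ch ∧
      (s.reg .r8).toNat = g.ci ∧ (s.reg .r9).toNat = g.pi := by
  have hroom := he.room
  have hch : g.ch < 2 ^ 32 := by
    unfold G.ch
    omega
  refine ⟨?_, ?_, ?_, ?_, ?_, ?_⟩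
  · rw [w_rsp]
    exact toNat_slot6 g hroom.1 272 (by omega)
  · rw [w_rdi]
    rfl
  · rw [w_rdx]
    rfl
  · rw [w_rcx]
    show (Word.ofBV (BitVec.ofNat 32 g.ch)).toNat % 2 ^ 32 = g.ch
    rw [toNat_ofBV32, BitVec.toNat_ofNat]
    omega
  · rw [w_r8]
    exact toNat_slot6 g hroom.1 104 (by omega)
  · rw [w_r9]
    exact toNat_slot6 g hroom.1 88 (by omega)

/-- `add r13d, 1` on a small counter. -/
theorem incr32_6 (x : Nat) (hx : x + 1 < 2 ^ 32) :
    Word.ofBV (Word.part Width.w32 (UInt64.ofNat x) + 1#32) = UInt64.ofNat (x + 1) := by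
  apply UInt64.toNat_inj.mp
  rw [toNat_ofBV32, BitVec.toNat_add, Asan.part32_toNat, UInt64.toNat_ofNat', UInt64.toNat_ofNat']
  have e1 : (1#32).toNat = 1 := by decide
  rw [e1]
  omega

/-- **COMMON at a state after the call**: its memory is the memory `m` after the return (no store since), the frame registers are
the steady ones; the pieces are those of `after_call6`, `Bits` is the callee's. -/
theorem common_after6 {u₀ : State} {g : G} (he : Entered u₀ g) {v s' : State} (c : Common u₀ g v) {m : Mem} (hm : s'.mem = m)
    (rbp : s'.reg .rbp = g.e.reg .rsp - 8) (rsp : s'.reg .rsp = g.e.reg .rsp - 248)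
    (code : CodeOK u₀ s'.mem) (inv : abiInv s')
    (k_slot : ∀ k n : Nat, n ≤ k → k ≤ 248 → (104 ≤ k - n ∨ k ≤ 100) → (88 ≤ k - n ∨ k ≤ 84) →
      m.readLE (g.e.reg .rsp - UInt64.ofNat k) n = v.mem.readLE (g.e.reg .rsp - UInt64.ofNat k) n)
    (same : Mem.SameExcept (g.spec.footprint g.e) g.e.mem m)
    (shadow : ShadowInv g.others' g.frames' (g.RA - 248) m) (bits : Bits g.Blk g.len m g.f)
    (busy : ADOBusy g.A' g.others' m g.f g.sz) (tb : TempRows m g.TB g.C g.PRD) (mu_le : mu m g.f ≤ mu g.e.mem g.f) :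
    Common u₀ g s' := by
  subst hm
  apply Common.of_frame he rbp rsp code inv
  · exact (congrArg UInt64.ofNat (k_slot 8 8 (by omega) (by omega) (by omega) (by omega))).trans c.s_rbp
  · exact (congrArg UInt64.ofNat (k_slot 16 8 (by omega) (by omega) (by omega) (by omega))).trans c.s_r15
  · exact (congrArg UInt64.ofNat (k_slot 24 8 (by omega) (by omega) (by omega) (by omega))).trans c.s_r14
  · exact (congrArg UInt64.ofNat (k_slot 32 8 (by omega) (by omega) (by omega) (by omega))).trans c.s_r13
  · exact (congrArg UInt64.ofNat (k_slot 40 8 (by omega) (by omega) (by omega) (by omega))).trans c.s_r12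
  · exact (congrArg UInt64.ofNat (k_slot 48 8 (by omega) (by omega) (by omega) (by omega))).trans c.s_rbx
  · exact (congrArg UInt64.ofNat (k_slot 184 8 (by omega) (by omega) (by omega) (by omega))).trans c.fr_f
  · exact (congrArg UInt64.ofNat (k_slot 216 8 (by omega) (by omega) (by omega) (by omega))).trans c.fr_rb
  · exact (k_slot 156 4 (by omega) (by omega) (by omega) (by omega)).trans c.fr_ch
  · exact (k_slot 196 4 (by omega) (by omega) (by omega) (by omega)).trans c.fr_prd
  · exact (k_slot 200 4 (by omega) (by omega) (by omega) (by omega)).trans c.fr_w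
  · exact (k_slot 232 4 (by omega) (by omega) (by omega) (by omega)).trans c.fr_rtype
  · exact (k_slot 176 8 (by omega) (by omega) (by omega) (by omega)).trans c.fr_pcd
  · exact (k_slot 240 8 (by omega) (by omega) (by omega) (by omega)).trans c.fr_si
  · exact same
  · exact shadow
  · exact bits
  · exact busy
  · exact tb
  · exact mu_le

/-- **THE CALL ARM of the i-loop 2229** (0x10f4ed … 0x10f54d + 0x10f639 … 0x10f640; C 2238–2241), ONE walk to the call and one after it:
the check of `f->codebooks` (0x10f4fb), `rsi = f->codebooks + b`, the two pushed arguments; the precondition of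
codebook_decode_deinterleave_repeat is `deintPre_of`; after the return the memory differs from the cut's inside `CallWin6` windows
only (`callWin6_of_mem`), so `after_call6` gives the pieces of COMMON, the slots and the i-loop's invariant; `Common.same` is
`Entered.same_through_deint`. Result 1: CI from the callee (`DeintPost.one`), the latch, the loop head `cut21`; result 0: r15d := tap,
`done:` (`cut32`). -/
theorem call_arm {Lay : Layout} (hLay : Lay.hi = 0x1000000) {μ : Microarch} (hμ : UserX.MicroOK μ) {u₀ : State}
    (hcode : HasCodeNat Lay u₀ Vorbis.L.decode_residue.entry Vorbis.Code.code_decode_residue.nat Vorbis.L.decode_residue.size)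
    (h_load8 : Asan.SmallCheck Lay μ Vorbis.WayInv (Vorbis.CodeOK u₀) [.rax, .rcx, .rdx] 8 Vorbis.L.__asan_load8_noabort.entry)
    {g : G}
    (h_deint : Calls Lay μ Vorbis.WayInv (Vorbis.conv u₀) Vorbis.L.codebook_decode_deinterleave_repeat.entry
      (Vorbis.Spec.codebook_decode_deinterleave_repeat.spec g.others' g.frames' g.Blk g.len))
    (hent : Entered u₀ g) (pass cs i pcount b : Nat) (v : State) (hat : AtCall6 u₀ g pass cs i pcount b v) :
    ReachVia Lay μ WayInv v (fun v' => AtInner u₀ g pass cs (i + 1) (pcount + 1) v' ∨ At32 u₀ g v') := by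
  obtain ⟨hrip, hc, hch3, hr12, hpath, hr15, hr13, hslcs, hwi, hinter, hi, hp, hslpsz, hrbx, hblt, hbook⟩ := hat
  have he := hent.entry
  v_entry he
  obtain ⟨hwf1, hwf2, hwf3⟩ := obj_where6 hent
  obtain ⟨f, hf⟩ : ∃ f : Nat, (g.e.reg .rdi).toNat = f := ⟨_, rfl⟩
  have hgf : g.f = f := hf
  have hrdi : g.e.reg .rdi = addr f := eq_addr _ _ hf
  rw [hgf] at hwf1 hwf2 hwf3
  have haf : (addr f).toNat = f := toNat_addr f (by omega)
  have w_rip := hrip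
  have hv_rsp := hc.rsp
  have hv_rbp := hc.rbp
  have w_eq : Mem.EqOn Vorbis.L.textLo Vorbis.L.textHi u₀.mem v.mem := hc.code
  have hdf : v.flags .df = false := (show abiInv _ from hc.inv).1
  have hmx : v.mxcsr &&& 0x1F80 = 0x1F80 := (show abiInv _ from hc.inv).2
  have hsse := Vorbis.sseOK_of_abiInv hc.inv
  have l_f : UInt64.ofNat (v.mem.readLE (g.e.reg .rsp - 184) 8) = addr f := by rw [hc.fr_f, hrdi]
  have l_rb := hc.fr_rb
  have l_ch := hc.fr_ch
  have l_psz := hslpsz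
  have l_n := hpath.sl_n
  have l_tap := hpath.sl_tap
  obtain ⟨cbs, hcbs⟩ : ∃ cbs, stb_vorbis.codebooks v.mem f = cbs := ⟨_, rfl⟩
  have l_cbs : v.mem.readLE (addr f + 168) 8 = cbs := by
    rw [← hcbs]
    simp only [vfield, vacc, voff]
  u_walk hcode [hμ.vendor] until [Vorbis.L.decode_residue.cut21, Vorbis.L.decode_residue.cut32] span [Vorbis.L.textLo, Vorbis.L.textHi] side (v_side)
  case check_10f4fb =>
    -- 0x10f4fb, load8 [f + 168] (`f->codebooks`)
    have hun : ShadowUntouched v.mem s_10f4fb.mem := by v_untouched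
    exact Vorbis.Spec.check_site hc.shadow hun (f_site hc 168 8 (by omega) (by omega))
      (by rw [hgf]; simp only [vfield]; exact toNat_addr _ (by omega))
  case call_inv => v_inv
  case pre_10f538 =>
    have hroom := hent.room
    have hs : Mem.SameExcept (ownWins g) v.mem s_10f538.mem := by
      show Mem.SameExcept [⟨(g.e.reg .rsp).toNat - 848, (g.e.reg .rsp).toNat - 248⟩,
        ⟨(g.e.reg .rsp).toNat - 224, (g.e.reg .rsp).toNat - 220⟩,
        ⟨(g.e.reg .rsp).toNat - 192, (g.e.reg .rsp).toNat - 188⟩, ⟨(g.e.reg .rsp).toNat - 160, (g.e.reg .rsp).toNat - 156⟩,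
        ⟨(g.e.reg .rsp).toNat - 104, (g.e.reg .rsp).toNat - 100⟩, ⟨(g.e.reg .rsp).toNat - 88, (g.e.reg .rsp).toNat - 84⟩]
        v.mem s_10f538.mem
      u_same
    obtain ⟨hsame, hbits, hun⟩ := frame_of_stack hent hc hs
    obtain ⟨hrsp, hrdi', hrdx, hrcx, hr8, hr9⟩ := call_regs6 hent w_rsp (w_rdi.trans hrdi.symm) w_rdx w_rcx w_r8 w_r9
    have hn32 : g.n < 2 ^ 32 := by
      unfold G.n
      omega
    have hK := factK_A hent hc hpath.rtype2 (by omega) hp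
    rw [hc.reads.part_size] at hK
    obtain ⟨psz, hpsz⟩ : ∃ psz, Residue.part_size g.e.mem g.r = psz := ⟨_, rfl⟩
    rw [hpsz] at hK w_mem
    have hlen : s_10f538.mem.u32 (g.RA - 264) = g.n := by
      have ea : addr (g.RA - 264) = g.e.reg .rsp - 264 := addr_slot g hroom.1 264 (by omega)
      have h8 : s_10f538.mem.readLE (g.e.reg .rsp - 264) 8 = g.n := by
        u_resolve
        rw [push32 g.n hn32]
        omega
      unfold Mem.u32
      rw [ea, X86.User.Mem.readLE_prefix _ _ 4 4, show (4 + 4 : Nat) = 8 from rfl, h8]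
      omega
    have htot : 1 ≤ s_10f538.mem.i32 (g.RA - 256) := by
      have ea : addr (g.RA - 256) = g.e.reg .rsp - 256 := addr_slot g hroom.1 256 (by omega)
      have h8 : s_10f538.mem.readLE (g.e.reg .rsp - 256) 8 = psz := by
        u_resolve
        rw [push32 psz (by omega)]
        omega
      unfold Mem.i32 Mem.u32
      rw [ea, X86.User.Mem.readLE_prefix _ _ 4 4, show (4 + 4 : Nat) = 8 from rfl, h8]
      have e : psz % 256 ^ 4 = psz := Nat.mod_eq_of_lt (by omega)
      rw [e]
      unfold sint32
      rw [if_pos (by omega)]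
      omega
    obtain ⟨hv', hsep', hd'⟩ := hent.frame hsame hbits
    have hw168 : InWins decodeWins 168 8 := by
      apply InWins.of_mem (144, 1000) (by decide)
      · show 144 ≤ 168
        omega
      · show 168 + 8 ≤ 1000
        omega
    have ecbs : stb_vorbis.codebooks s_10f538.mem g.f = cbs := by
      have e1 := hd'.ptr 168 hw168
      have e2 := hc.obj.ptr 168 hw168
      rw [← hcbs, ← hgf]
      simp only [vacc, voff]
      exact e1.trans e2.symm
    have hb' : (b : Int) < stb_vorbis.codebook_count s_10f538.mem g.f := by
      rw [(hent.reads hsame).1.codebook_count, ← hc.reads.codebook_count]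
      exact hbook
    have hv : Real.VorbisOK g.len g.Blk v.mem g.f := hc.point.vorbis
    have hF2 := hv.config.cb0.F2
    have hin := hent.pre.env.ok.inside _ hF2
    simp only [voff] at hin
    rw [hgf, hcbs] at hin
    have hrsi : (s_10f538.reg .rsi).toNat = stb_vorbis.codebooks_at s_10f538.mem g.f b := by
      rw [w_rsi, book_addr6 b cbs hblt (by omega)]
      unfold stb_vorbis.codebooks_at
      simp only [voff]
      rw [ecbs]
    have hinter' : InterAt s_10f538.mem g.ci g.pi g.ch g.n := by
      have ea : addr (g.RA - 104) = g.e.reg .rsp - 104 := addr_slot g hroom.1 104 (by omega)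
      have eb : addr (g.RA - 88) = g.e.reg .rsp - 88 := addr_slot g hroom.1 88 (by omega)
      apply hinter.frame
      · show sint32 (s_10f538.mem.readLE (addr (g.RA - 104)) 4) = sint32 (v.mem.readLE (addr (g.RA - 104)) 4)
        rw [ea]
        congr 1
        u_resolve
      · show sint32 (s_10f538.mem.readLE (addr (g.RA - 88)) 4) = sint32 (v.mem.readLE (addr (g.RA - 88)) 4)
        rw [eb]
        congr 1
        u_resolve
    exact deintPre_of hent hc hsame hbits hun hch3 hrsp hrdi' hb' hrsi hrdx hrcx hr8 hr9 hlen htot hinter'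
  case cont =>
    have hroom := hent.room
    have hn32 : g.n < 2 ^ 32 := by
      unfold G.n
      omega
    have hC1 : 1 ≤ g.C := by
      have h := hent.args.ch_le
      unfold G.C
      omega
    -- the state at the callee's first instruction
    have hs1 : Mem.SameExcept [⟨(g.e.reg .rsp).toNat - 848, (g.e.reg .rsp).toNat - 248⟩] v.mem s_10f538.mem := by
      rw [w_mem_10f538]
      u_same
    have hs : Mem.SameExcept (ownWins g) v.mem s_10f538.mem := by
      apply hs1.mono
      intro w hw a h1 h2
      rw [List.mem_singleton.mp hw] at h1 h2
      exact ⟨_, List.mem_cons_self, h1, h2⟩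
    obtain ⟨hsame, hbits, hun⟩ := frame_of_stack hent hc hs
    obtain ⟨hrsp, hrdi', hrdx, hrcx, hr8, hr9⟩ :=
      call_regs6 hent w_rsp_10f538 (w_rdi_10f538.trans hrdi.symm) w_rdx_10f538 w_rcx_10f538 w_r8_10f538 w_r9_10f538
    have hlen : s_10f538.mem.u32 (g.RA - 264) = g.n := by
      have ea : addr (g.RA - 264) = g.e.reg .rsp - 264 := addr_slot g hroom.1 264 (by omega)
      have h8 : s_10f538.mem.readLE (g.e.reg .rsp - 264) 8 = g.n := by
        have w_mem := w_mem_10f538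
        u_resolve
        rw [push32 g.n hn32]
        omega
      unfold Mem.u32
      rw [ea, X86.User.Mem.readLE_prefix _ _ 4 4, show (4 + 4 : Nat) = 8 from rfl, h8]
      omega
    -- the memory after the return
    obtain ⟨p_un, p_reader, p_result, p_one, p_zero⟩ := w_post
    have hsame' : Mem.SameExcept (g.spec.footprint g.e) g.e.mem s_10f538r.mem :=
      hent.same_through_deint hsame hrsp hrdi' hrdx hrcx hr8 hr9 hlen (lo := (s_10f538.reg .rsp).toNat - 496)
        (hi := (s_10f538.reg .rsp).toNat) (by omega) (by omega) (by omega) w_same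
    have hcall : Mem.SameExcept ((⟨(s_10f538.reg .rsp).toNat - 496, (s_10f538.reg .rsp).toNat⟩ : Span) :: deint.wins s_10f538)
        s_10f538.mem s_10f538r.mem := w_same
    have hvm : Mem.SameExcept ((⟨g.RA - 848, g.RA - 248⟩ : Span) ::
        (⟨(s_10f538.reg .rsp).toNat - 496, (s_10f538.reg .rsp).toNat⟩ : Span) :: deint.wins s_10f538) v.mem s_10f538r.mem := by
      refine (hs1.mono ?_).trans (hcall.mono ?_)
      · intro w hw a h1 h2
        rw [List.mem_singleton.mp hw] at h1 h2
        exact ⟨_, List.mem_cons_self, h1, h2⟩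
      · intro w hw a h1 h2
        exact ⟨w, List.mem_cons_of_mem _ hw, h1, h2⟩
    have hwins : ∀ w, w ∈ (⟨g.RA - 848, g.RA - 248⟩ : Span) ::
        (⟨(s_10f538.reg .rsp).toNat - 496, (s_10f538.reg .rsp).toNat⟩ : Span) :: deint.wins s_10f538 → CallWin6 g w := by
      intro w hw
      rcases List.mem_cons.mp hw with h0 | h1
      · left
        rw [h0]
        exact ⟨Nat.le_refl _, Nat.le_refl _⟩
      · exact callWin6_of_mem hent hsame hrsp hrdi' hrdx hrcx hr8 hr9 hlen (by omega) (by omega) w h1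
    have hmu1 := (Vorbis.Spec.Reader.reader_of_window hc.point.vorbis.bits hs1 (by omega)).2
    obtain ⟨k_shadow, k_busy, k_tb, k_mu, k_slot, k_wi⟩ := after_call6 hent hc hvm hwins (hun.trans p_un)
      (by rw [hrdi'] at p_reader; have := p_reader.mu_le; omega) hsame' hC1
    have k_tap : s_10f538r.mem.readLE (g.e.reg .rsp - 228) 4 = g.tap :=
      (k_slot 228 4 (by omega) (by omega) (by omega) (by omega)).trans hpath.sl_tap
    v_after_call w_rsp_10f538 w_mem_10f538
    have hbits' : Bits g.Blk g.len s_10f538r.mem g.f := by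
      rw [hrdi'] at p_reader
      exact p_reader.bits
    rcases p_result with hrax | hrax
    · -- result 0: `goto done`
      have w_rax : s_10f538r.reg .rax = 0 := hrax
      u_walk hcode [hμ.vendor] until [Vorbis.L.decode_residue.cut21, Vorbis.L.decode_residue.cut32] span [Vorbis.L.textLo, Vorbis.L.textHi] side (v_side)
      all_goals first
        | (exfalso; exact hbr_10f543 rfl)
        | skip
      · have htap32 : g.tap < 2 ^ 32 := by
          have h := hent.ado.ok.AR1
          unfold G.tap
          omega
        have hcom : Common u₀ g s_10f640 :=
          common_after6 hent hc w_mem ((w_kept .rbp rfl).trans hv_rbp) w_rsp w_eq (by v_inv) k_slot hsame' k_shadow hbits'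
            k_busy k_tb k_mu
        refine ReachVia.done (Or.inr ⟨w_rip, hcom, ?_⟩)
        rw [w_r15]
        apply UInt64.toNat_inj.mp
        rw [toNat_ofBV32, BitVec.toNat_ofNat, UInt64.toNat_ofNat']
        omega
    · -- result 1: the latch `++i, ++pcount`, the loop head
      have w_rax : s_10f538r.reg .rax = 1 := hrax
      u_walk hcode [hμ.vendor] until [Vorbis.L.decode_residue.cut21, Vorbis.L.decode_residue.cut32] span [Vorbis.L.textLo, Vorbis.L.textHi] side (v_side)
      all_goals first
        | (exfalso; exact absurd hbr_10f543 (by decide))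
        | skip
      · have hWlt := w_lt g
        have hprd := prd_le hent
        have hcom : Common u₀ g s_10f54d :=
          common_after6 hent hc w_mem ((w_kept .rbp rfl).trans hv_rbp) w_rsp w_eq (by v_inv) k_slot hsame' k_shadow hbits'
            k_busy k_tb k_mu
        have hpath' : PathA g pass s_10f54d := by
          refine ⟨hpath.rtype2, hpath.ch_ge, hpath.pass_le, ?_, ?_, ?_⟩
          · rw [w_mem]
            exact (k_slot 168 4 (by omega) (by omega) (by omega) (by omega)).trans hpath.sl_pass
          · rw [w_mem]
            exact (k_slot 228 4 (by omega) (by omega) (by omega) (by omega)).trans hpath.sl_tap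
          · rw [w_mem]
            exact (k_slot 208 4 (by omega) (by omega) (by omega) (by omega)).trans hpath.sl_n
        have hinter' : InterAt s_10f54d.mem g.ci g.pi g.ch g.n := by
          have h := p_one hrax
          have e8 : (s_10f538.reg .rsp).toNat + 8 = g.RA - 264 := by omega
          rw [hr8, hr9, hrcx, e8, hlen] at h
          rw [w_mem]
          exact h
        refine ReachVia.done (Or.inl ⟨w_rip, hcom, hch3, (w_kept .r12 rfl).trans hr12, hpath', ?_, ?_, ?_, ?_, hinter'⟩)
        · rw [w_r15]
          exact incr32_6 pcount (by omega)
        · rw [w_r13]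
          exact incr32_6 i (by omega)
        · rw [w_mem]
          exact (k_slot 224 4 (by omega) (by omega) (by omega) (by omega)).trans hslcs
        · rw [w_mem]
          exact (k_wi pass cs i pcount hwi).step hi hp

end Vorbis.Spec.decode_residue_6bb
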